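-- pv_equiv track=rewrite | github.com/kilotins/ws-log-analyzer | wslog.py | per_file_summary
-- ===== SOURCE A (Python) =====
-- def per_file_summary(events):
--     """Return list of (filename, total, error_count) for each source file."""
--     files = {}
--     for e in events:
--         f = e["file"]
--         if f not in files:
--             files[f] = {"total": 0, "errors": 0}
--         files[f]["total"] += 1
--         if e.get("level") in ("ERROR", "SEVERE", "FATAL"):
--             files[f]["errors"] += 1
--     return [(f, files[f]["total"], files[f]["errors"]) for f in sorted(files)]
-- ===== SOURCE B (Python) =====
-- def per_file_summary(events):
--     """Return list of (filename, total, error_count) for each source file."""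
--     names = sorted({e["file"] for e in events})
--     return [
--         (f,
--          sum(1 for e in events if e["file"] == f),
--          sum(1 for e in events
--              if e["file"] == f and e.get("level") in ("ERROR", "SEVERE", "FATAL")))
--         for f in names
--     ]
-- ===== Notes on version B (the rewrite author's own statement) =====
-- stated objective: simpler
-- what changed: Replaces the incremental dict-of-counter-dicts with a declarative two-liner: collect the distinct filenames, sort them, then count each file's events and errors with per-file comprehension passes.
import Mathlib
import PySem

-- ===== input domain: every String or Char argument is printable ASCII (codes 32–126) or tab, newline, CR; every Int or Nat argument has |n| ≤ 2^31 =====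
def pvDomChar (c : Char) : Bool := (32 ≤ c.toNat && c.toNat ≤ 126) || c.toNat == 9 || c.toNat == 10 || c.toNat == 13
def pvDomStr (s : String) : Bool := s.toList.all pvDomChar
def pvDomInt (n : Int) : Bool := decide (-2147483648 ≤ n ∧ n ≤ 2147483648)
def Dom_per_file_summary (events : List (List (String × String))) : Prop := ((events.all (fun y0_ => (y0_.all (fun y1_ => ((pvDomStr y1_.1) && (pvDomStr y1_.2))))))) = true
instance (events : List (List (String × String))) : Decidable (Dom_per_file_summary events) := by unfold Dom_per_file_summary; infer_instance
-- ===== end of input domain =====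

-- B replaces A's one-pass dict of counter dicts by a simpler declarative decomposition:
-- sorted distinct filenames, then per-file counting passes over the events.

-- ===== PORT A =====
-- e["file"]  (KeyError when the key is absent is excluded by Pre_; both Pythons read it identically)
def pvFile (e : List (String × String)) : String :=
  (PySem.Dict.get? (PySem.Dict.mk e) "file").getD ""

-- e.get("level") in ("ERROR", "SEVERE", "FATAL")  (None when absent, and None is not in the tuple)
def pvIsErr (e : List (String × String)) : Bool :=
  match PySem.Dict.get? (PySem.Dict.mk e) "level" with
  | some l => l == "ERROR" || l == "SEVERE" || l == "FATAL"
  | none => false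

-- the body of A's for-loop
def pvStepA (files : PySem.Dict String (PySem.Dict String Int)) (e : List (String × String)) :
    PySem.Dict String (PySem.Dict String Int) :=
  let f := pvFile e
  let files := if files.contains f then files
    else files.insert f (PySem.Dict.ofList [("total", (0 : Int)), ("errors", (0 : Int))])
  let files := files.modify f PySem.Dict.empty (fun d => d.modify "total" 0 (· + 1))
  if pvIsErr e then files.modify f PySem.Dict.empty (fun d => d.modify "errors" 0 (· + 1))
  else files

def per_file_summary (events : List (List (String × String))) : List (String × Int × Int) :=
  let files := events.foldl pvStepA PySem.Dict.empty
  (PySem.List.sorted files.keys (fun x => x) false).map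
    (fun f => (f, (files.getD f PySem.Dict.empty).getD "total" 0,
                  (files.getD f PySem.Dict.empty).getD "errors" 0))

-- ===== PORT B =====
def per_file_summary_alt (events : List (List (String × String))) : List (String × Int × Int) :=
  let names := PySem.List.sorted (PySem.Set.ofList (events.map pvFile)) (fun x => x) false
  names.map (fun f =>
    (f, ((events.filter (fun e => pvFile e == f)).length : Int),
        ((events.filter (fun e => pvFile e == f && pvIsErr e)).length : Int)))

-- ===== PRECONDITION & SPEC =====
-- Pre_ excludes events without a "file" key, on which the Python A (and the Python B) raises KeyError.
def Pre_per_file_summary (events : List (List (String × String))) : Prop :=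
  ∀ e ∈ events, (PySem.Dict.get? (PySem.Dict.mk e) "file").isSome
instance (events : List (List (String × String))) : Decidable (Pre_per_file_summary events) := by unfold Pre_per_file_summary; infer_instance
def pvWitness_per_file_summary : (List (List (String × String))) :=
  [[("file", "a"), ("level", "ERROR")], [("file", "b")]]
def Spec_per_file_summary (events : List (List (String × String))) (out : List (String × Int × Int)) : Prop := out = per_file_summary_alt events
instance (events : List (List (String × String))) (out : List (String × Int × Int)) : Decidable (Spec_per_file_summary events out) := by unfold Spec_per_file_summary; infer_instance

-- ===== CLAIM (what is proved, stated in full; the proofs are below) =====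
def Claim_equal_per_file_summary : Prop := ∀ (events : List (List (String × String))), Dom_per_file_summary events → Pre_per_file_summary events → Spec_per_file_summary events (per_file_summary events)

-- ===== LEMMAS AND PROOFS =====

-- one loop iteration of A: it adds the event's filename to the key set …
theorem pvStepA_keys (d : PySem.Dict String (PySem.Dict String Int)) (e : List (String × String)) :
    (pvStepA d e).keys = PySem.Set.add d.keys (pvFile e) := by
  unfold pvStepA PySem.Set.add
  cases he : pvIsErr e <;>
  by_cases hc : d.contains (pvFile e) = true <;>
    simp [hc, he, PySem.Set.contains, PySem.Dict.keys_modify,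
      PySem.Dict.keys_insert_of_not_contains, PySem.Dict.keys_insert_of_contains,
      PySem.Dict.contains_modify, PySem.Dict.contains_insert_self,
      PySem.Dict.contains_iff_mem_keys] <;>
    first
      | exact (PySem.Dict.contains_iff_mem_keys d _).mp hc
      | exact fun h => hc ((PySem.Dict.contains_iff_mem_keys d _).mpr h)

-- … bumps that file's "total" …
theorem pvStepA_total (d : PySem.Dict String (PySem.Dict String Int)) (e : List (String × String)) (f : String) :
    ((pvStepA d e).getD f PySem.Dict.empty).getD "total" 0 =
      (d.getD f PySem.Dict.empty).getD "total" 0 + (if pvFile e == f then 1 else 0) := by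
  unfold pvStepA
  by_cases hf : pvFile e = f
  · subst hf
    by_cases hc : d.contains (pvFile e) = true <;> cases he : pvIsErr e <;>
      simp [hc, he, PySem.Dict.getD_modify_self, PySem.Dict.getD_insert_self,
        PySem.Dict.getD_modify_of_ne, PySem.Dict.getD_of_not_contains, PySem.Dict.getD_empty,
        PySem.Dict.contains_modify, PySem.Dict.contains_insert_self] <;> decide
  · have hf' : ¬ f = pvFile e := fun h => hf h.symm
    by_cases hc : d.contains (pvFile e) = true <;> cases he : pvIsErr e <;>
      simp [hc, he, hf, hf', PySem.Dict.getD_modify, PySem.Dict.getD_insert]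

-- … and bumps its "errors" exactly on error-levelled events.
theorem pvStepA_errors (d : PySem.Dict String (PySem.Dict String Int)) (e : List (String × String)) (f : String) :
    ((pvStepA d e).getD f PySem.Dict.empty).getD "errors" 0 =
      (d.getD f PySem.Dict.empty).getD "errors" 0 + (if pvFile e == f && pvIsErr e then 1 else 0) := by
  unfold pvStepA
  by_cases hf : pvFile e = f
  · subst hf
    by_cases hc : d.contains (pvFile e) = true <;> cases he : pvIsErr e <;>
      simp [hc, he, PySem.Dict.getD_modify_self, PySem.Dict.getD_insert_self,
        PySem.Dict.getD_modify_of_ne, PySem.Dict.getD_of_not_contains, PySem.Dict.getD_empty,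
        PySem.Dict.contains_modify, PySem.Dict.contains_insert_self] <;> decide
  · have hf' : ¬ f = pvFile e := fun h => hf h.symm
    by_cases hc : d.contains (pvFile e) = true <;> cases he : pvIsErr e <;>
      simp [hc, he, hf, hf', PySem.Dict.getD_modify, PySem.Dict.getD_insert]

-- A's whole loop: keys are the first-occurrence-ordered distinct filenames …
theorem pvFold_keys (l : List (List (String × String))) (d : PySem.Dict String (PySem.Dict String Int)) :
    (l.foldl pvStepA d).keys = PySem.Set.update d.keys (l.map pvFile) := by
  induction l generalizing d with
  | nil => simp [PySem.Set.update]
  | cons e t ih => simp [List.foldl_cons, ih, pvStepA_keys, PySem.Set.update]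

-- … "total" at f counts the events with filename f …
theorem pvFold_total (l : List (List (String × String))) (d : PySem.Dict String (PySem.Dict String Int)) (f : String) :
    ((l.foldl pvStepA d).getD f PySem.Dict.empty).getD "total" 0 =
      (d.getD f PySem.Dict.empty).getD "total" 0 + (l.countP (fun e => pvFile e == f) : Int) := by
  induction l generalizing d with
  | nil => simp
  | cons e t ih =>
    rw [List.foldl_cons, ih, pvStepA_total, List.countP_cons]
    by_cases h : pvFile e == f <;> simp [h] <;> push_cast <;> ring

-- … and "errors" at f counts the error-levelled events with filename f.
theorem pvFold_errors (l : List (List (String × String))) (d : PySem.Dict String (PySem.Dict String Int)) (f : String) :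
    ((l.foldl pvStepA d).getD f PySem.Dict.empty).getD "errors" 0 =
      (d.getD f PySem.Dict.empty).getD "errors" 0 + (l.countP (fun e => pvFile e == f && pvIsErr e) : Int) := by
  induction l generalizing d with
  | nil => simp
  | cons e t ih =>
    rw [List.foldl_cons, ih, pvStepA_errors, List.countP_cons]
    by_cases h : (pvFile e == f && pvIsErr e) = true <;> simp [h] <;> push_cast <;> ring

-- glue: updating the empty set IS building the set of the list (both are the same foldl)
theorem pvSet_update_nil (l : List String) :
    PySem.Set.update ([] : List String) l = PySem.Set.ofList l := rfl

-- ===== VERDICT (by name: the statement is the Claim_ definition above) =====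
theorem per_file_summary_spec : Claim_equal_per_file_summary := by
  intro events _ _
  unfold Spec_per_file_summary per_file_summary per_file_summary_alt
  simp only [pvFold_keys, pvFold_total, pvFold_errors, PySem.Dict.keys_empty,
    PySem.Dict.getD_empty, pvSet_update_nil, List.countP_eq_length_filter, zero_add]
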